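-- pv_equiv track=rewrite | github.com/jorgeramirez/cs-gym | algo-expert/largest-range.py | largest_range_v1
-- ===== SOURCE A (Python) =====
-- def get_delta(range_desc):
--     """
--     Computes the length of the given range. The lenght means how many numbers are in
--     the range.
--     """
--     if range_desc[0] < 0 and range_desc[1] >= 0:
--         delta = abs(range_desc[0] - range_desc[1])
--
--         if range_desc[1] == 0:
--             delta += 1
--         return delta
--     return range_desc[1] - range_desc[0] + 1
--
-- def sort_array(array):
--     array.sort()
--
-- def largest_range_v1(array):
--     """
--       Time: O(nlogn)
--       Space: O(1)
--
--       This alternative sorts the array first.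
--         1. sort the array
--         2. iterate over the array and create groups of items that form a range
--         3. return the largest group
--     """
--     if array == None:
--         return [0, 0]
--
--     if len(array) == 0:
--         return [0, 0]
--
--     sort_array(array)
--     range_found = [array[0], array[0]]
--     current_range = [array[0], array[0]]
--
--     for i in range(1, len(array)):
--         delta = array[i] - current_range[1]
--
--         if delta == 1 or delta == 0:  # delta=0 handles repited numbers
--             current_range[1] = array[i]
--         else:
--             delta_current = get_delta(current_range)
--             delta_found = get_delta(range_found)
--
--             if delta_current > delta_found:
--                 range_found = current_range.copy()  # avoid reference issues!!!
--             current_range[0] = array[i]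
--             current_range[1] = array[i]
--
--     delta_current = get_delta(current_range)
--     delta_found = get_delta(range_found)
--
--     if delta_current > delta_found:
--         return current_range
--     return range_found
-- ===== SOURCE B (Python) =====
-- def get_delta(range_desc):
--     """Length measure of a range, as this module defines it."""
--     if range_desc[0] < 0 and range_desc[1] >= 0:
--         delta = abs(range_desc[0] - range_desc[1])
--         if range_desc[1] == 0:
--             delta += 1
--         return delta
--     return range_desc[1] - range_desc[0] + 1
--
-- def largest_range_v1(array):
--     """
--     Hash-set version: no sorting; put everything in a set, expand a run only from
--     its start (num-1 absent), keep the best by (delta, smaller start).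
--     Does not mutate the input (the original sorts it in place).
--     """
--     if array is None or len(array) == 0:
--         return [0, 0]
--     s = set(array)
--     best = None
--     best_delta = 0
--     for num in s:
--         if num - 1 in s:
--             continue
--         end = num
--         while end + 1 in s:
--             end += 1
--         delta = get_delta([num, end])
--         if best is None or delta > best_delta or (delta == best_delta and num < best[0]):
--             best = [num, end]
--             best_delta = delta
--     return best
-- ===== Notes on version B (the rewrite author's own statement) =====
-- stated objective: alternative
-- what changed: A sorts the array and scans it for maximal consecutive groups; B never sorts: it builds a hash set and expands a run only from each range start (num-1 absent), keeping the best by the module's get_delta and, on a delta tie, the smaller start (exactly A's first-group-wins rule).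
import Mathlib
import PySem

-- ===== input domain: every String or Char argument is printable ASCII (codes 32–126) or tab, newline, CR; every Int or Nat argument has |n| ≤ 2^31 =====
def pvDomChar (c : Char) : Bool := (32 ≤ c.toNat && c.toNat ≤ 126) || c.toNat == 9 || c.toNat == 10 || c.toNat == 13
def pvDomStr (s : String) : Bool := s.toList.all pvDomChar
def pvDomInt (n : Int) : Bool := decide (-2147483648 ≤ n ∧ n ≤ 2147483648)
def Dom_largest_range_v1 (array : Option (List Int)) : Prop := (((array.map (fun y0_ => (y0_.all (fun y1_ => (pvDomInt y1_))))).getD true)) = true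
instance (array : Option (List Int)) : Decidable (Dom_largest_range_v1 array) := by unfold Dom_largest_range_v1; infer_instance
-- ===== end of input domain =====

-- B replaces A's sort-then-scan with a sort-free hash-set run-expansion pass
-- (keeping the module's get_delta length measure); the equivalence proved is about
-- the RETURN value only — A sorts its argument in place, B does not mutate it.

-- ===== PORT A =====
-- shared module helper get_delta (used by both Python versions)
def get_delta (r : Int × Int) : Int :=
  if r.1 < 0 ∧ 0 ≤ r.2 then
    let delta := |r.1 - r.2|
    if r.2 = 0 then delta + 1 else delta
  else r.2 - r.1 + 1

-- loop body of A's `for i in range(1, len(array))`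
def stepA (st : (Int × Int) × (Int × Int)) (x : Int) : (Int × Int) × (Int × Int) :=
  let rf := st.1
  let cr := st.2
  let delta := x - cr.2
  if delta = 1 ∨ delta = 0 then (rf, (cr.1, x))
  else
    let dc := get_delta cr
    let df := get_delta rf
    if dc > df then (cr, (x, x)) else (rf, (x, x))

def largest_range_v1 (array : Option (List Int)) : List Int :=
  match array with
  | none => [0, 0]
  | some arr =>
    if arr.length = 0 then [0, 0]
    else
      let s := PySem.List.sorted arr (fun x => x) false
      let a0 := PySem.List.pyGetD s 0 0
      let st := (PySem.List.pyRange 1 (arr.length : Int) 1).foldl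
          (fun st i => stepA st (PySem.List.pyGetD s i 0)) ((a0, a0), (a0, a0))
      if get_delta st.2 > get_delta st.1 then [st.2.1, st.2.2] else [st.1.1, st.1.2]

-- ===== PORT B =====
-- B's `while end + 1 in s: end += 1`; fuel = |s| always suffices (run length ≤ |s|)
def expandRun (s : PySem.Set Int) : Int → Nat → Int
  | e, 0 => e
  | e, f + 1 => if PySem.Set.contains s (e + 1) then expandRun s (e + 1) f else e

-- B's best-update: keep the run with the larger delta; on a delta tie, the smaller start
def lexStep (st : Option ((Int × Int) × Int)) (r : Int × Int) : Option ((Int × Int) × Int) :=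
  let d := get_delta r
  match st with
  | none => some (r, d)
  | some (best, bd) => if d > bd ∨ (d = bd ∧ r.1 < best.1) then some (r, d) else some (best, bd)

-- loop body of B's `for num in s`
def stepB (s : PySem.Set Int) (st : Option ((Int × Int) × Int)) (num : Int) : Option ((Int × Int) × Int) :=
  if PySem.Set.contains s (num - 1) then st
  else lexStep st (num, expandRun s num s.length)

def largest_range_v1_alt (array : Option (List Int)) : List Int :=
  match array with
  | none => [0, 0]
  | some arr =>
    if arr.length = 0 then [0, 0]
    else
      let s := PySem.Set.ofList arr
      match s.foldl (stepB s) none with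
      | some (best, _) => [best.1, best.2]
      | none => [0, 0]  -- unreachable totality default: a nonempty set has a run start

-- ===== PRECONDITION & SPEC =====
def Spec_largest_range_v1 (array : Option (List Int)) (out : List Int) : Prop := out = largest_range_v1_alt array
instance (array : Option (List Int)) (out : List Int) : Decidable (Spec_largest_range_v1 array out) := by unfold Spec_largest_range_v1; infer_instance

-- ===== CLAIM (what is proved, stated in full; the proofs are below) =====
def Claim_equal_largest_range_v1 : Prop := ∀ (array : Option (List Int)), Dom_largest_range_v1 array → Spec_largest_range_v1 array (largest_range_v1 array)

-- ===== LEMMAS AND PROOFS =====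

-- basic facts about the module's delta measure
lemma get_delta_ge_one (a b : Int) (h : a ≤ b) : 1 ≤ get_delta (a, b) := by
  have habs : |a - b| = b - a := by rw [abs_sub_comm]; exact abs_of_nonneg (by omega)
  simp only [get_delta, habs]
  split_ifs <;> omega

lemma get_delta_eq_one_iff (a b : Int) (h : a ≤ b) : get_delta (a, b) = 1 ↔ a = b := by
  have habs : |a - b| = b - a := by rw [abs_sub_comm]; exact abs_of_nonneg (by omega)
  simp only [get_delta, habs]
  split_ifs <;> omega

-- A's final comparison, as a binary operation
def cmpA (bf r : Int × Int) : Int × Int :=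
  if get_delta r > get_delta bf then r else bf

-- run decomposition mirroring A's branch condition
def runsAux : Int → Int → List Int → List (Int × Int)
  | a, b, [] => [(a, b)]
  | a, b, x :: t =>
    if x - b = 1 ∨ x - b = 0 then runsAux a x t else (a, b) :: runsAux x x t

-- A's scan followed by the final comparison is a fold of cmpA over the runs
lemma scanA_runs (t : List Int) : ∀ (a b : Int) (rf : Int × Int),
    cmpA (t.foldl stepA (rf, (a, b))).1 (t.foldl stepA (rf, (a, b))).2
      = (runsAux a b t).foldl cmpA rf := by
  induction t with
  | nil => intro a b rf; simp [runsAux, cmpA]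
  | cons x t ih =>
    intro a b rf
    by_cases hc : x - b = 1 ∨ x - b = 0
    · simp only [List.foldl_cons, stepA, runsAux, if_pos hc]
      exact ih a x rf
    · simp only [List.foldl_cons, stepA, runsAux, if_neg hc, List.foldl_cons]
      have : (if get_delta (a, b) > get_delta rf then ((a, b), (x, x)) else (rf, (x, x)))
          = (cmpA rf (a, b), (x, x)) := by
        simp only [cmpA]; split_ifs <;> rfl
      rw [this]
      exact ih x x (cmpA rf (a, b))

-- adjacent-duplicate removal (seeded with the previous value)
def dedupAdj : Int → List Int → List Int
  | _, [] => []
  | b, x :: t => if x = b then dedupAdj b t else x :: dedupAdj x t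

lemma runsAux_dedupAdj (t : List Int) : ∀ a b, runsAux a b t = runsAux a b (dedupAdj b t) := by
  induction t with
  | nil => intro a b; rfl
  | cons x t ih =>
    intro a b
    by_cases hx : x = b
    · subst hx
      have hd : dedupAdj x (x :: t) = dedupAdj x t := by simp [dedupAdj]
      have hr : runsAux a x (x :: t) = runsAux a x t := by simp [runsAux]
      rw [hd, hr]; exact ih a x
    · simp only [runsAux, dedupAdj, if_neg hx]
      by_cases hc : x - b = 1 ∨ x - b = 0
      · rw [if_pos hc, if_pos hc]; exact ih a x
      · rw [if_neg hc, if_neg hc, ih x x]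

lemma dedupAdj_spec (t : List Int) : ∀ b, (b :: t).Pairwise (· ≤ ·) →
    ((b :: dedupAdj b t).Pairwise (· < ·)) ∧ (∀ x, x ∈ b :: dedupAdj b t ↔ x ∈ b :: t) := by
  induction t with
  | nil => exact fun b _ => ⟨by simp [dedupAdj], by simp [dedupAdj]⟩
  | cons x t ih =>
    intro b h
    rw [List.pairwise_cons] at h
    obtain ⟨hb, hxt⟩ := h
    by_cases hx : x = b
    · subst hx
      have hxt' : (x :: t).Pairwise (· ≤ ·) := hxt
      obtain ⟨p1, p2⟩ := ih x hxt'
      simp only [dedupAdj]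
      refine ⟨p1, fun y => ?_⟩
      have := p2 y
      simp only [List.mem_cons] at *
      tauto
    · have hbx : b < x := lt_of_le_of_ne (hb x (by simp)) (fun e => hx e.symm)
      obtain ⟨p1, p2⟩ := ih x hxt
      simp only [dedupAdj, if_neg hx]
      constructor
      · rw [List.pairwise_cons]
        refine ⟨fun y hy => ?_, p1⟩
        rcases List.mem_cons.mp hy with h1 | h2
        · omega
        · have hyx : x < y := by
            rw [List.pairwise_cons] at p1
            exact p1.1 y h2
          omega
      · intro y
        have := p2 y
        simp only [List.mem_cons] at *
        tauto

-- B's loop is a fold of lexStep over the expanded range-starts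
lemma foldB_filter (S : PySem.Set Int) (l : List Int) : ∀ st,
    l.foldl (stepB S) st
      = ((l.filter (fun x => !(PySem.Set.contains S (x - 1)))).map
          (fun x => (x, expandRun S x S.length))).foldl lexStep st := by
  induction l with
  | nil => intro st; rfl
  | cons x l ih =>
    intro st
    by_cases hc : x - 1 ∈ S
    · simp [stepB, hc, ih]
    · simp [stepB, hc, ih]

lemma le_expandRun (S : PySem.Set Int) : ∀ (fuel : Nat) (a : Int), a ≤ expandRun S a fuel := by
  intro fuel
  induction fuel with
  | zero => intro a; simp [expandRun]
  | succ f ih =>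
    intro a
    simp only [expandRun]
    split_ifs
    · have := ih (a + 1); omega
    · omega

lemma expandRun_eq (S : PySem.Set Int) (b : Int) : ∀ (fuel : Nat) (a : Int), a ≤ b →
    (∀ c, a ≤ c → c ≤ b → PySem.Set.contains S c = true) →
    PySem.Set.contains S (b + 1) = false →
    (b - a).toNat ≤ fuel → expandRun S a fuel = b := by
  intro fuel
  induction fuel with
  | zero =>
    intro a hab _ _ hf
    have : a = b := by omega
    simp [expandRun, this]
  | succ f ih =>
    intro a hab hin hout hf
    by_cases hEq : a = b
    · subst hEq
      simp only [expandRun]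
      rw [hout]
      simp
    · have hlt : a < b := by omega
      have h1 : PySem.Set.contains S (a + 1) = true := hin (a + 1) (by omega) (by omega)
      simp only [expandRun, h1, if_true]
      exact ih (a + 1) (by omega) (fun c hc1 hc2 => hin c (by omega) hc2) hout (by omega)

lemma interval_le_length (S : List Int) (_hnd : S.Nodup) (a b : Int) (h : a ≤ b)
    (hsub : ∀ c, a ≤ c → c ≤ b → c ∈ S) : (b - a).toNat < S.length := by
  have hsub' : PySem.List.pyRange a (b + 1) 1 ⊆ S := by
    intro c hc
    rw [PySem.List.mem_pyRange_one] at hc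
    exact hsub c hc.1 (by omega)
  have := (List.Nodup.subperm (PySem.List.nodup_pyRange_one a (b + 1)) hsub').length_le
  rw [PySem.List.length_pyRange_one] at this
  omega

-- the runs of the strictly increasing tail are exactly the expanded range-starts
lemma runs_eq_filter (S : PySem.Set Int) (hnd : S.Nodup) : ∀ (ut : List Int) (a b : Int),
    a ≤ b →
    (∀ y, b ≤ y → (PySem.Set.contains S y = true ↔ y = b ∨ y ∈ ut)) →
    (∀ c, a ≤ c → c ≤ b → PySem.Set.contains S c = true) →
    (b :: ut).Pairwise (· < ·) →
    runsAux a b ut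
      = (a, expandRun S a S.length)
        :: (ut.filter (fun x => !(PySem.Set.contains S (x - 1)))).map
             (fun x => (x, expandRun S x S.length)) := by
  intro ut
  induction ut with
  | nil =>
    intro a b hab hmem hint _
    have hout : PySem.Set.contains S (b + 1) = false := by
      cases hcb : PySem.Set.contains S (b + 1) with
      | false => rfl
      | true =>
        exfalso
        rcases (hmem (b + 1) (by omega)).mp hcb with h | h
        · omega
        · simp at h
    have hfuel : (b - a).toNat ≤ S.length := by
      have := interval_le_length S hnd a b hab
        (fun c h1 h2 => (PySem.Set.contains_iff S c).mp (hint c h1 h2))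
      omega
    have := expandRun_eq S b S.length a hab hint hout hfuel
    simp [runsAux, this]
  | cons x t ih =>
    intro a b hab hmem hint hpw
    rw [List.pairwise_cons] at hpw
    obtain ⟨hblt, hpwt⟩ := hpw
    have hbx : b < x := hblt x (by simp)
    have hxlt : ∀ y ∈ t, x < y := by
      rw [List.pairwise_cons] at hpwt; exact hpwt.1
    by_cases hstep : x = b + 1
    · -- the run continues
      subst hstep
      have hcond : (b + 1) - b = 1 ∨ (b + 1) - b = 0 := Or.inl (by omega)
      simp only [runsAux, if_pos hcond]
      have hmem' : ∀ y, b + 1 ≤ y → (PySem.Set.contains S y = true ↔ y = b + 1 ∨ y ∈ t) := by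
        intro y hy
        rw [hmem y (by omega)]
        simp only [List.mem_cons]
        constructor
        · rintro (h1 | h1 | h1)
          · omega
          · exact Or.inl h1
          · exact Or.inr h1
        · rintro (h1 | h1)
          · exact Or.inr (Or.inl h1)
          · exact Or.inr (Or.inr h1)
      have hint' : ∀ c, a ≤ c → c ≤ b + 1 → PySem.Set.contains S c = true := by
        intro c h1 h2
        by_cases hc : c ≤ b
        · exact hint c h1 hc
        · have : c = b + 1 := by omega
          subst this
          rw [hmem (b + 1) (by omega)]
          simp
      have hpw' : ((b + 1) :: t).Pairwise (· < ·) := by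
        rw [List.pairwise_cons]
        exact ⟨fun y hy => by have := hxlt y hy; omega, hpwt.sublist (List.sublist_cons_self _ _)⟩
      rw [ih a (b + 1) (by omega) hmem' hint' hpw']
      -- x = b+1 is not a range start: b is in S
      have hxnot : PySem.Set.contains S ((b + 1) - 1) = true := by
        have : (b + 1) - 1 = b := by omega
        rw [this]; exact hint b hab (by omega)
      have hb' : b ∈ S := by
        have : (b + 1) - 1 = b := by omega
        rw [this] at hxnot
        exact (PySem.Set.contains_iff S b).mp hxnot
      simp [hb']
    · -- a gap: the run [a,b] is emitted
      have hgap : b + 1 < x := by omega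
      have hcond : ¬(x - b = 1 ∨ x - b = 0) := by omega
      simp only [runsAux, if_neg hcond]
      have hout : PySem.Set.contains S (b + 1) = false := by
        have h := hmem (b + 1) (by omega)
        cases hcb : PySem.Set.contains S (b + 1)
        · rfl
        · have := h.mp hcb
          simp only [List.mem_cons] at this
          rcases this with h1 | h1 | h1
          · omega
          · omega
          · have := hxlt _ h1; omega
      have hfuel : (b - a).toNat ≤ S.length := by
        have := interval_le_length S hnd a b hab
          (fun c h1 h2 => (PySem.Set.contains_iff S c).mp (hint c h1 h2))
        omega
      have hexp : expandRun S a S.length = b := expandRun_eq S b S.length a hab hint hout hfuel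
      have hmem' : ∀ y, x ≤ y → (PySem.Set.contains S y = true ↔ y = x ∨ y ∈ t) := by
        intro y hy
        rw [hmem y (by omega)]
        simp only [List.mem_cons]
        constructor
        · rintro (h1 | h1 | h1)
          · omega
          · exact Or.inl h1
          · exact Or.inr h1
        · rintro (h1 | h1)
          · exact Or.inr (Or.inl h1)
          · exact Or.inr (Or.inr h1)
      have hint' : ∀ c, x ≤ c → c ≤ x → PySem.Set.contains S c = true := by
        intro c h1 h2
        have hcx : c = x := by omega
        rw [hcx, hmem x (by omega)]; simp
      have hxstart : PySem.Set.contains S (x - 1) = false := by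
        have h := hmem (x - 1) (by omega)
        cases hcb : PySem.Set.contains S (x - 1)
        · rfl
        · have := h.mp hcb
          simp only [List.mem_cons] at this
          rcases this with h1 | h1 | h1
          · omega
          · omega
          · have := hxlt _ h1; omega
      rw [ih x x (le_refl x) hmem' hint' hpwt]
      have hx' : x - 1 ∉ S := by
        intro hmem2
        rw [(PySem.Set.contains_iff S (x - 1)).mpr hmem2] at hxstart
        exact absurd hxstart (by simp)
      simp [hx', hexp]

-- lexStep commutes on runs with distinct starts
lemma lex_comm (x y : Int × Int) (hxy : x.1 ≠ y.1) (z : Option ((Int × Int) × Int)) :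
    lexStep (lexStep z x) y = lexStep (lexStep z y) x := by
  rcases z with _ | ⟨b, bd⟩ <;>
    simp only [lexStep] <;>
    split_ifs <;> (try dsimp only) <;> (try split_ifs) <;>
    first
      | rfl
      | (exfalso; omega)

-- over ascending starts, lexStep's fold agrees with A's first-max fold
lemma lexfold_eq (R' : List (Int × Int)) : ∀ (best : Int × Int),
    (∀ r ∈ R', best.1 < r.1) → ((R'.map Prod.fst).Pairwise (· < ·)) →
    R'.foldl lexStep (some (best, get_delta best))
      = some (R'.foldl cmpA best, get_delta (R'.foldl cmpA best)) := by
  induction R' with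
  | nil => intro best _ _; rfl
  | cons r R'' ih =>
    intro best hlt hpw
    have hbr : best.1 < r.1 := hlt r (by simp)
    simp only [List.map_cons, List.pairwise_cons] at hpw
    obtain ⟨hr, hpw'⟩ := hpw
    simp only [List.foldl_cons]
    by_cases hd : get_delta r > get_delta best
    · have : lexStep (some (best, get_delta best)) r = some (r, get_delta r) := by
        simp [lexStep, hd]
      rw [this]
      have : cmpA best r = r := by simp [cmpA, hd]
      rw [this]
      exact ih r (fun r' hr' => hr r'.1 (List.mem_map_of_mem hr')) hpw'
    · have : lexStep (some (best, get_delta best)) r = some (best, get_delta best) := by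
        simp only [lexStep]
        rw [if_neg (by rintro (h | ⟨h1, h2⟩) <;> omega)]
      rw [this]
      have : cmpA best r = best := by simp [cmpA, hd]
      rw [this]
      refine ih best (fun r' hr' => ?_) hpw'
      have := hr r'.1 (List.mem_map_of_mem hr')
      omega

lemma cmpA_init (a0 e0 : Int) (h : a0 ≤ e0) : cmpA (a0, a0) (a0, e0) = (a0, e0) := by
  have h1 : get_delta (a0, a0) = 1 := by
    have : a0 ≤ a0 := le_refl a0
    exact (get_delta_eq_one_iff a0 a0 this).mpr rfl
  simp only [cmpA, h1]
  split_ifs with hc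
  · rfl
  · have hge := get_delta_ge_one a0 e0 h
    have : get_delta (a0, e0) = 1 := by omega
    have := (get_delta_eq_one_iff a0 e0 h).mp this
    simp [this]

-- ===== main equivalence on a nonempty list =====
lemma main_eq (arr : List Int) (hne : arr ≠ []) :
    largest_range_v1 (some arr) = largest_range_v1_alt (some arr) := by
  have hlen0 : ¬ arr.length = 0 := by simpa using hne
  -- names for the main objects
  set sA := PySem.List.sorted arr (fun x => x) false with hsAdef
  obtain ⟨a0, tA, hsA⟩ : ∃ a0 tA, sA = a0 :: tA := by
    cases h : sA with
    | nil =>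
      exfalso
      have := PySem.List.length_sorted arr (fun x => x) false
      rw [hsAdef] at h
      rw [h] at this
      simp at this
      exact hlen0 (by omega)
    | cons a t => exact ⟨a, t, rfl⟩
  set S := PySem.Set.ofList arr with hSdef
  set ut := dedupAdj a0 tA with hutdef
  -- sorted list is nondecreasing; dedupAdj makes it strictly increasing
  have hPWle : (a0 :: tA).Pairwise (· ≤ ·) := by
    rw [← hsA]; exact PySem.List.sorted_pairwise arr (fun x => x)
  obtain ⟨hPWlt, hmemEq⟩ := dedupAdj_spec tA a0 hPWle
  -- a0 :: ut is a permutation of the set S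
  have hmemS : ∀ x, x ∈ S ↔ x ∈ a0 :: ut := by
    intro x
    rw [hSdef, PySem.Set.mem_ofList, hmemEq x, ← hsA, hsAdef, PySem.List.mem_sorted]
  have hndS : S.Nodup := PySem.Set.nodup_ofList arr
  have hndU : (a0 :: ut).Nodup := hPWlt.imp (fun h => ne_of_lt h)
  have hperm : S.Perm (a0 :: ut) := (List.perm_ext_iff_of_nodup hndS hndU).mpr hmemS
  -- facts feeding runs_eq_filter
  have ha0S : PySem.Set.contains S a0 = true := by
    rw [PySem.Set.contains_iff, hmemS]; simp
  have hmemRuns : ∀ y, a0 ≤ y → (PySem.Set.contains S y = true ↔ y = a0 ∨ y ∈ ut) := by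
    intro y _
    rw [PySem.Set.contains_iff, hmemS]
    simp
  have hintRuns : ∀ c, a0 ≤ c → c ≤ a0 → PySem.Set.contains S c = true := by
    intro c h1 h2
    have : c = a0 := by omega
    rw [this]; exact ha0S
  have hRuns := runs_eq_filter S hndS ut a0 a0 (le_refl a0) hmemRuns hintRuns hPWlt
  -- names for the run list
  set p : Int → Bool := fun x => !(PySem.Set.contains S (x - 1)) with hpdef
  set toRun : Int → Int × Int := fun x => (x, expandRun S x S.length) with htoRundef
  set R' : List (Int × Int) := (ut.filter p).map toRun with hR'def
  set r0 : Int × Int := (a0, expandRun S a0 S.length) with hr0def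
  have ha0start : p a0 = true := by
    rw [hpdef]
    simp only [Bool.not_eq_true']
    cases hcb : PySem.Set.contains S (a0 - 1)
    · rfl
    · exfalso
      have := (PySem.Set.contains_iff S (a0 - 1)).mp hcb
      rw [hmemS] at this
      rcases List.mem_cons.mp this with h | h
      · omega
      · rw [List.pairwise_cons] at hPWlt
        have := hPWlt.1 _ h
        omega
  -- every element of the mapped run list carries its own start
  have hVshape : ∀ l : List Int, ∀ r ∈ l.map toRun, r = toRun r.1 := by
    intro l r hr
    obtain ⟨w, _, hw⟩ := List.mem_map.mp hr
    rw [← hw, htoRundef]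
  -- ===== A side =====
  have hAfold : largest_range_v1 (some arr)
      = [(cmpA (tA.foldl stepA ((a0, a0), (a0, a0))).1 (tA.foldl stepA ((a0, a0), (a0, a0))).2).1,
         (cmpA (tA.foldl stepA ((a0, a0), (a0, a0))).1 (tA.foldl stepA ((a0, a0), (a0, a0))).2).2] := by
    simp only [largest_range_v1, if_neg hlen0]
    rw [show (arr.length : Int) = (sA.length : Int) by
      rw [hsAdef, PySem.List.length_sorted]]
    rw [PySem.List.foldl_pyRange_pyGetD' sA 0 stepA _ (by omega : (0:Int) ≤ 1)]
    rw [← hsAdef, hsA]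
    simp only [Int.toNat_one, List.drop_one, List.tail_cons, PySem.List.pyGetD_zero_cons]
    simp only [cmpA]
    split_ifs <;> rfl
  have hA : largest_range_v1 (some arr) = [(R'.foldl cmpA r0).1, (R'.foldl cmpA r0).2] := by
    rw [hAfold]
    rw [scanA_runs tA a0 a0 ((a0, a0)), runsAux_dedupAdj, ← hutdef, hRuns]
    have h1 : a0 ≤ expandRun S a0 S.length := le_expandRun S S.length a0
    rw [List.foldl_cons, cmpA_init a0 _ h1]
  -- ===== B side =====
  have hBfold : S.foldl (stepB S) none = (r0 :: R').foldl lexStep none := by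
    rw [foldB_filter S S none]
    have hcomm : ∀ x ∈ (S.filter p).map toRun, ∀ y ∈ (S.filter p).map toRun,
        ∀ z, lexStep (lexStep z x) y = lexStep (lexStep z y) x := by
      intro x hx y hy z
      by_cases hxy : x.1 = y.1
      · have ex := hVshape _ x hx
        have ey := hVshape _ y hy
        have : x = y := by rw [ex, ey, hxy]
        rw [this]
      · exact lex_comm x y hxy z
    have hpermV : ((S.filter p).map toRun).Perm ((a0 :: ut.filter p).map toRun) := by
      refine List.Perm.map toRun ?_
      have := hperm.filter p
      rwa [List.filter_cons, if_pos ha0start] at this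
    rw [List.Perm.foldl_eq' hpermV hcomm none]
    rfl
  have hB : largest_range_v1_alt (some arr) = [(R'.foldl cmpA r0).1, (R'.foldl cmpA r0).2] := by
    simp only [largest_range_v1_alt, if_neg hlen0, ← hSdef]
    rw [hBfold]
    have hstarts : ∀ r ∈ R', r0.1 < r.1 := by
      intro r hr
      rw [hR'def] at hr
      obtain ⟨w, hw1, hw2⟩ := List.mem_map.mp hr
      have hwut : w ∈ ut := List.mem_of_mem_filter hw1
      rw [List.pairwise_cons] at hPWlt
      have := hPWlt.1 w hwut
      rw [← hw2, htoRundef, hr0def]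
      simpa using this
    have hpwR' : (R'.map Prod.fst).Pairwise (· < ·) := by
      rw [hR'def, List.map_map]
      have : (Prod.fst ∘ toRun) = id := by
        funext w; rw [htoRundef]; rfl
      rw [this, List.map_id]
      rw [List.pairwise_cons] at hPWlt
      exact hPWlt.2.filter p
    rw [List.foldl_cons]
    have h0 : lexStep none r0 = some (r0, get_delta r0) := rfl
    rw [h0, lexfold_eq R' r0 hstarts hpwR']
  rw [hA, hB]

-- ===== VERDICT (by name: the statement is the Claim_ definition above) =====
theorem largest_range_v1_spec : Claim_equal_largest_range_v1 := by
  intro array _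
  unfold Spec_largest_range_v1
  match array with
  | none => rfl
  | some arr =>
    by_cases h : arr = []
    · subst h; rfl
    · exact main_eq arr h
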